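-- pv_equiv track=rewrite | github.com/liuyan0828/ping_service | utils/log_handler.py | get_log_difference
-- ===== SOURCE A (Python) =====
-- def get_log_difference(base_pingback_log, test_pingback_log):
--     different_data = {}
--     update_key = set(base_pingback_log).intersection(set(test_pingback_log))
--     absence_key = set(base_pingback_log).difference(set(test_pingback_log))
--     additional_key = set(test_pingback_log).difference(set(base_pingback_log))
--     for key in update_key:
--         if base_pingback_log[key] != test_pingback_log[key]:
--             different_data[key] = {}
--             different_data[key]["base_value"] = base_pingback_log[key]
--             different_data[key]["test_value"] = test_pingback_log[key]
--     for key in absence_key: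
--         different_data[key] = {}
--         different_data[key]["only_base"] = base_pingback_log[key]
--     for key in additional_key:
--         different_data[key] = {}
--         different_data[key]["only_test"] = test_pingback_log[key]
--     return different_data
-- ===== SOURCE B (Python) =====
-- def get_log_difference(base_pingback_log, test_pingback_log):
--     # Consume entries from a working copy of test while walking base once:
--     # a popped entry with a different value is a changed key, an absent key is
--     # only-in-base, and whatever is left in the copy afterwards is exactly the
--     # only-in-test part -- no set operations and no membership test against base.
--     remaining = dict(test_pingback_log)
--     changed = {}
--     only_base = {}
--     for key, base_value in base_pingback_log.items():
--         if key in remaining: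
--             test_value = remaining.pop(key)
--             if base_value != test_value:
--                 changed[key] = {"base_value": base_value,
--                                 "test_value": test_value}
--         else:
--             only_base[key] = {"only_base": base_value}
--     changed.update(only_base)
--     for key, test_value in remaining.items():
--         changed[key] = {"only_test": test_value}
--     return changed
-- ===== Notes on version B (the rewrite author's own statement) =====
-- stated objective: alternative
-- what changed: Instead of building three key sets (intersection and two differences) and looping over each, B walks base once while consuming matched entries from a working copy of test via pop; the leftover of that copy IS the only-in-test part, so the third group needs no membership test or set operation at all.
import Mathlib
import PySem

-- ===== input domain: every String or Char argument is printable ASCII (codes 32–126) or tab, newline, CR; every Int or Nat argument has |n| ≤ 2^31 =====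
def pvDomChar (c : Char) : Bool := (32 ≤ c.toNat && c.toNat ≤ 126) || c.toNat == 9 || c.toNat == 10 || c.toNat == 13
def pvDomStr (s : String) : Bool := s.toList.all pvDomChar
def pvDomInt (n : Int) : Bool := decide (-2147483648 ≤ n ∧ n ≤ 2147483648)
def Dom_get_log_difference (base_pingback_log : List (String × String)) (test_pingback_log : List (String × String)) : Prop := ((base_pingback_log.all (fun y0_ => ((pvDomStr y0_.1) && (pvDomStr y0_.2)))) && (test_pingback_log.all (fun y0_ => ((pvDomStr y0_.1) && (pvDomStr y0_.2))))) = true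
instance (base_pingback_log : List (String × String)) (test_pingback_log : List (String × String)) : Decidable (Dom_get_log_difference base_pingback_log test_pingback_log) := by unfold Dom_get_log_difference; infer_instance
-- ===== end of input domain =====

-- B replaces A's three set constructions and three loops by a single pass over base that
-- consumes matched entries out of a working copy of test (pop); the leftover of that copy
-- is the only-in-test part (objective: alternative). Dict outputs are compared ignoring
-- order; the ports fix first-insertion order for the set iterations whose order Python
-- leaves to hashing.

-- ===== PORT A =====
-- key lookups base[key]/test[key] are ported as getD _ "" : every looked-up key is
-- guaranteed present in the respective dict, so the default is never used.
def get_log_difference (base_pingback_log : List (String × String)) (test_pingback_log : List (String × String)) : List (String × List (String × String)) :=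
  let bd := PySem.Dict.ofList base_pingback_log
  let td := PySem.Dict.ofList test_pingback_log
  let update_key := PySem.Set.inter (PySem.Set.ofList bd.keys) (PySem.Set.ofList td.keys)
  let absence_key := PySem.Set.diff (PySem.Set.ofList bd.keys) (PySem.Set.ofList td.keys)
  let additional_key := PySem.Set.diff (PySem.Set.ofList td.keys) (PySem.Set.ofList bd.keys)
  let d1 := update_key.foldl (fun d k =>
      if bd.getD k "" ≠ td.getD k "" then
        d.insert k [("base_value", bd.getD k ""), ("test_value", td.getD k "")]
      else d) PySem.Dict.empty
  let d2 := absence_key.foldl (fun d k => d.insert k [("only_base", bd.getD k "")]) d1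
  let d3 := additional_key.foldl (fun d k => d.insert k [("only_test", td.getD k "")]) d2
  d3.items

-- ===== PORT B =====
-- the loop state is Source B's (remaining, changed, only_base); 'key in remaining' followed by
-- 'remaining.pop(key)' is ported as one match on pop? (none exactly when the key is absent).
def get_log_difference_alt (base_pingback_log : List (String × String)) (test_pingback_log : List (String × String)) : List (String × List (String × String)) :=
  let st := (PySem.Dict.ofList base_pingback_log).items.foldl
      (fun (st : PySem.Dict String String × PySem.Dict String (List (String × String)) × PySem.Dict String (List (String × String))) kv =>
        match st.1.pop? kv.1 with
        | some (test_value, rem) =>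
            if kv.2 ≠ test_value then
              (rem, st.2.1.insert kv.1 [("base_value", kv.2), ("test_value", test_value)], st.2.2)
            else (rem, st.2.1, st.2.2)
        | none => (st.1, st.2.1, st.2.2.insert kv.1 [("only_base", kv.2)]))
      (PySem.Dict.ofList test_pingback_log, PySem.Dict.empty, PySem.Dict.empty)
  let changed := st.2.2.items.foldl (fun d kv => d.insert kv.1 kv.2) st.2.1
  let final := st.1.items.foldl (fun d kv => d.insert kv.1 [("only_test", kv.2)]) changed
  final.items

-- ===== PRECONDITION & SPEC =====
def Spec_get_log_difference (base_pingback_log : List (String × String)) (test_pingback_log : List (String × String)) (out : List (String × List (String × String))) : Prop := out = get_log_difference_alt base_pingback_log test_pingback_log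
instance (base_pingback_log : List (String × String)) (test_pingback_log : List (String × String)) (out : List (String × List (String × String))) : Decidable (Spec_get_log_difference base_pingback_log test_pingback_log out) := by unfold Spec_get_log_difference; infer_instance

-- ===== CLAIM (what is proved, stated in full; the proofs are below) =====
def Claim_equal_get_log_difference : Prop := ∀ (base_pingback_log : List (String × String)) (test_pingback_log : List (String × String)), Dom_get_log_difference base_pingback_log test_pingback_log → Spec_get_log_difference base_pingback_log test_pingback_log (get_log_difference base_pingback_log test_pingback_log)

-- ===== LEMMAS AND PROOFS =====

-- A's conditional insertion loop over fresh, duplicate-free keys appends its records.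
theorem foldA_if_items (p : String → Prop) [DecidablePred p]
    (f : String → List (String × String)) :
    ∀ (ks : List String) (d : PySem.Dict String (List (String × String))),
      ks.Nodup → (∀ k ∈ ks, d.contains k = false) →
      (ks.foldl (fun d k => if p k then d.insert k (f k) else d) d).items
        = d.items ++ (ks.filter (fun k => decide (p k))).map (fun k => (k, f k)) := by
  intro ks
  induction ks with
  | nil => intro d _ _; simp
  | cons k ks ih =>
    intro d hnd hfresh
    have hk : d.contains k = false := hfresh k (by simp)
    have hknotin : k ∉ ks := (List.nodup_cons.mp hnd).1
    by_cases hp : p k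
    · have hins := PySem.Dict.items_insert_of_not_contains d (f k) hk
      have hfresh' : ∀ k' ∈ ks, (d.insert k (f k)).contains k' = false := by
        intro k' hk'
        have hne : k' ≠ k := fun h => hknotin (h ▸ hk')
        simp [PySem.Dict.contains_insert, hne, hfresh k' (List.mem_cons_of_mem _ hk')]
      simp only [List.foldl_cons, if_pos hp]
      rw [ih _ (List.nodup_cons.mp hnd).2 hfresh', hins]
      simp [hp]
    · simp only [List.foldl_cons, if_neg hp]
      rw [ih _ (List.nodup_cons.mp hnd).2 (fun k' hk' => hfresh k' (List.mem_cons_of_mem _ hk'))]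
      simp [hp]

-- A's unconditional insertion loops over fresh, duplicate-free keys append their records.
theorem foldA_items (f : String → List (String × String)) :
    ∀ (ks : List String) (d : PySem.Dict String (List (String × String))),
      ks.Nodup → (∀ k ∈ ks, d.contains k = false) →
      (ks.foldl (fun d k => d.insert k (f k)) d).items
        = d.items ++ ks.map (fun k => (k, f k)) := by
  intro ks
  induction ks with
  | nil => intro d _ _; simp
  | cons k ks ih =>
    intro d hnd hfresh
    have hk : d.contains k = false := hfresh k (by simp)
    have hknotin : k ∉ ks := (List.nodup_cons.mp hnd).1
    have hins := PySem.Dict.items_insert_of_not_contains d (f k) hk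
    have hfresh' : ∀ k' ∈ ks, (d.insert k (f k)).contains k' = false := by
      intro k' hk'
      have hne : k' ≠ k := fun h => hknotin (h ▸ hk')
      simp [PySem.Dict.contains_insert, hne, hfresh k' (List.mem_cons_of_mem _ hk')]
    simp only [List.foldl_cons]
    rw [ih _ (List.nodup_cons.mp hnd).2 hfresh', hins]
    simp

-- a filtered map over the key list equals a filtered map over the item list
theorem seg_eq {α β γ : Type} {P : α → Bool} {Q : α × β → Bool} {f : α → γ} {g : α × β → γ}
    (L : List (α × β))
    (h1 : ∀ kv ∈ L, P kv.1 = Q kv)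
    (h2 : ∀ kv ∈ L, Q kv = true → f kv.1 = g kv) :
    ((L.map Prod.fst).filter P).map f = (L.filter Q).map g := by
  rw [List.filter_map, List.filter_congr (by intro kv hkv; exact h1 kv hkv), List.map_map]
  exact List.map_congr_left (fun kv hkv => h2 kv (List.mem_filter.mp hkv).1 (List.mem_filter.mp hkv).2)

-- Dict membership test equals membership test on the key list
theorem contains_eq_keys_contains {ν : Type} (d : PySem.Dict String ν) (k : String) :
    d.contains k = d.keys.contains k := by
  rw [Bool.eq_iff_iff]
  simp [PySem.Dict.contains_iff_mem_keys]

-- erase leaves membership and lookups at other keys unchanged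
theorem erase_contains_of_ne {ν : Type} (d : PySem.Dict String ν) {k k' : String} (h : k' ≠ k) :
    (d.erase k).contains k' = d.contains k' := by
  simp only [PySem.Dict.erase, PySem.Dict.contains]
  rw [Bool.eq_iff_iff]
  simp only [List.any_eq_true, List.mem_filter]
  constructor
  · rintro ⟨p, ⟨hp, _⟩, hk'⟩; exact ⟨p, hp, hk'⟩
  · rintro ⟨p, hp, hk'⟩
    refine ⟨p, ⟨hp, ?_⟩, hk'⟩
    have hpk' : p.1 = k' := by simpa using hk'
    simp [hpk', h]

theorem find?_filter_ne {ν : Type} {k k' : String} (h : k' ≠ k) :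
    ∀ (l : List (String × ν)),
      (l.filter (fun p => !(p.1 == k))).find? (fun p => p.1 == k')
        = l.find? (fun p => p.1 == k') := by
  intro l
  induction l with
  | nil => simp
  | cons p l ih =>
    by_cases hp : p.1 = k
    · have hdrop : (!(p.1 == k)) = false := by simp [hp]
      have hne : (p.1 == k') = false := by
        refine beq_eq_false_iff_ne.mpr ?_
        rw [hp]; exact fun hh => h hh.symm
      rw [List.filter_cons, if_neg (by simp [hdrop]), List.find?_cons, hne, ih]
    · have hkeep : (!(p.1 == k)) = true := by simp [hp]
      rw [List.filter_cons, if_pos hkeep]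
      by_cases hp' : p.1 = k'
      · have : (p.1 == k') = true := by simp [hp']
        rw [List.find?_cons, this, List.find?_cons, this]
      · have : (p.1 == k') = false := beq_eq_false_iff_ne.mpr hp'
        rw [List.find?_cons, this, List.find?_cons, this, ih]

theorem erase_getD_of_ne {ν : Type} (d : PySem.Dict String ν) {k k' : String} (h : k' ≠ k)
    (dflt : ν) : (d.erase k).getD k' dflt = d.getD k' dflt := by
  simp only [PySem.Dict.getD, PySem.Dict.get?, PySem.Dict.erase, PySem.Dict.items]
  rw [find?_filter_ne h]

-- B's consuming pass: state after folding L, relative to the INITIAL remaining dict R.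
theorem consume_spec :
    ∀ (L : List (String × String)) (R : PySem.Dict String String)
      (c o : PySem.Dict String (List (String × String))),
      (L.map Prod.fst).Nodup →
      (∀ kv ∈ L, c.contains kv.1 = false) →
      (∀ kv ∈ L, o.contains kv.1 = false) →
      L.foldl
        (fun (st : PySem.Dict String String × PySem.Dict String (List (String × String)) × PySem.Dict String (List (String × String))) kv =>
          match st.1.pop? kv.1 with
          | some (test_value, rem) =>
              if kv.2 ≠ test_value then
                (rem, st.2.1.insert kv.1 [("base_value", kv.2), ("test_value", test_value)], st.2.2)
              else (rem, st.2.1, st.2.2)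
          | none => (st.1, st.2.1, st.2.2.insert kv.1 [("only_base", kv.2)]))
        (R, c, o)
      = (⟨R.items.filter (fun kv => !(L.map Prod.fst).contains kv.1)⟩,
         ⟨c.items ++ (L.filter (fun kv => R.contains kv.1 && decide (kv.2 ≠ R.getD kv.1 ""))).map
             (fun kv => (kv.1, [("base_value", kv.2), ("test_value", R.getD kv.1 "")]))⟩,
         ⟨o.items ++ (L.filter (fun kv => !R.contains kv.1)).map
             (fun kv => (kv.1, [("only_base", kv.2)]))⟩) := by
  intro L
  induction L with
  | nil =>
    intro R c o _ _ _
    simp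
  | cons kv L ih =>
    intro R c o hnd hc ho
    have hnotin : kv.1 ∉ L.map Prod.fst := (List.nodup_cons.mp (by simpa using hnd)).1
    have hndL : (L.map Prod.fst).Nodup := (List.nodup_cons.mp (by simpa using hnd)).2
    have hne : ∀ kv' ∈ L, kv'.1 ≠ kv.1 := by
      intro kv' hkv' h
      exact hnotin (h ▸ List.mem_map_of_mem hkv')
    simp only [List.foldl_cons]
    by_cases hR : R.contains kv.1 = true
    · -- key present in remaining: pop it
      obtain ⟨v, hv⟩ : ∃ v, R.get? kv.1 = some v := by
        have := PySem.Dict.get?_eq_none_iff_contains (d := R) (k := kv.1)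
        cases hg : R.get? kv.1 with
        | none => rw [hg] at this; rw [this.mp rfl] at hR; exact absurd hR (by simp)
        | some v => exact ⟨v, rfl⟩
      have hgD : R.getD kv.1 "" = v := by simp [PySem.Dict.getD, hv]
      have hpop : R.pop? kv.1 = some (v, R.erase kv.1) := by
        simp [PySem.Dict.pop?, hv]
      -- facts about the erased dict on the tail
      have hcontains' : ∀ kv' ∈ L, (R.erase kv.1).contains kv'.1 = R.contains kv'.1 :=
        fun kv' h' => erase_contains_of_ne R (hne kv' h')
      have hgetD' : ∀ kv' ∈ L, (R.erase kv.1).getD kv'.1 "" = R.getD kv'.1 "" :=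
        fun kv' h' => erase_getD_of_ne R (hne kv' h') ""
      have hfiltc : L.filter (fun kv' => (R.erase kv.1).contains kv'.1 && decide (kv'.2 ≠ (R.erase kv.1).getD kv'.1 ""))
          = L.filter (fun kv' => R.contains kv'.1 && decide (kv'.2 ≠ R.getD kv'.1 "")) := by
        apply List.filter_congr
        intro kv' h'
        rw [hcontains' kv' h', hgetD' kv' h']
      have hfilto : L.filter (fun kv' => !(R.erase kv.1).contains kv'.1)
          = L.filter (fun kv' => !R.contains kv'.1) := by
        apply List.filter_congr
        intro kv' h'
        rw [hcontains' kv' h']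
      have hmapc : ∀ (l : List (String × String)), (∀ x ∈ l, x ∈ L) →
          l.map (fun kv' => (kv'.1, [("base_value", kv'.2), ("test_value", (R.erase kv.1).getD kv'.1 "")]))
            = l.map (fun kv' => (kv'.1, [("base_value", kv'.2), ("test_value", R.getD kv'.1 "")])) := by
        intro l hl
        apply List.map_congr_left
        intro x hx
        rw [hgetD' x (hl x hx)]
      have hrem : (R.erase kv.1).items.filter (fun p => !(L.map Prod.fst).contains p.1)
          = R.items.filter (fun p => !((kv :: L).map Prod.fst).contains p.1) := by
        simp only [PySem.Dict.erase, PySem.Dict.items, List.filter_filter]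
        apply List.filter_congr
        intro p _
        by_cases hb : p.1 = kv.1
        · simp [hb, List.contains_cons]
        · have h1 : (p.1 == kv.1) = false := beq_eq_false_iff_ne.mpr hb
          have h2 : (kv.1 == p.1) = false := beq_eq_false_iff_ne.mpr (fun hh => hb hh.symm)
          simp [List.contains_cons, h1, h2]
      by_cases hvne : kv.2 ≠ v
      · rw [hpop]
        simp only [if_pos hvne]
        rw [ih (R.erase kv.1) (c.insert kv.1 [("base_value", kv.2), ("test_value", v)]) o hndL
            (by intro kv' h'
                rw [PySem.Dict.contains_insert]
                simp [hne kv' h', hc kv' (List.mem_cons_of_mem _ h')])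
            (fun kv' h' => ho kv' (List.mem_cons_of_mem _ h'))]
        have hcins := PySem.Dict.items_insert_of_not_contains c
          [("base_value", kv.2), ("test_value", v)] (hc kv (by simp))
        refine Prod.ext ?_ (Prod.ext ?_ ?_) <;> simp only
        · exact congrArg _ hrem
        · apply congrArg
          rw [hfiltc, hmapc _ (fun x hx => (List.mem_filter.mp hx).1), hcins]
          have : (kv :: L).filter (fun kv' => R.contains kv'.1 && decide (kv'.2 ≠ R.getD kv'.1 ""))
              = kv :: L.filter (fun kv' => R.contains kv'.1 && decide (kv'.2 ≠ R.getD kv'.1 "")) := by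
            rw [List.filter_cons, if_pos (by simp [hR, hgD, hvne])]
          rw [this]
          simp [hgD]
        · apply congrArg
          rw [hfilto]
          have : (kv :: L).filter (fun kv' => !R.contains kv'.1)
              = L.filter (fun kv' => !R.contains kv'.1) := by
            rw [List.filter_cons, if_neg (by simp [hR])]
          rw [this]
      · rw [hpop]
        simp only [if_neg hvne]
        rw [ih (R.erase kv.1) c o hndL
            (fun kv' h' => hc kv' (List.mem_cons_of_mem _ h'))
            (fun kv' h' => ho kv' (List.mem_cons_of_mem _ h'))]
        refine Prod.ext ?_ (Prod.ext ?_ ?_) <;> simp only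
        · exact congrArg _ hrem
        · apply congrArg
          apply congrArg
          rw [hfiltc, hmapc _ (fun x hx => (List.mem_filter.mp hx).1)]
          have : (kv :: L).filter (fun kv' => R.contains kv'.1 && decide (kv'.2 ≠ R.getD kv'.1 ""))
              = L.filter (fun kv' => R.contains kv'.1 && decide (kv'.2 ≠ R.getD kv'.1 "")) := by
            rw [List.filter_cons, if_neg (by simp [hgD]; intro _; simpa using hvne)]
          rw [this]
        · apply congrArg
          rw [hfilto]
          have : (kv :: L).filter (fun kv' => !R.contains kv'.1)
              = L.filter (fun kv' => !R.contains kv'.1) := by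
            rw [List.filter_cons, if_neg (by simp [hR])]
          rw [this]
    · -- key absent from remaining: record only_base
      have hR' : R.contains kv.1 = false := by
        cases h : R.contains kv.1
        · rfl
        · exact absurd h hR
      have hpop : R.pop? kv.1 = none := by
        have := PySem.Dict.get?_eq_none_iff_contains (d := R) (k := kv.1)
        simp [PySem.Dict.pop?, this.mpr hR']
      rw [hpop]
      simp only
      rw [ih R c (o.insert kv.1 [("only_base", kv.2)]) hndL
          (fun kv' h' => hc kv' (List.mem_cons_of_mem _ h'))
          (by intro kv' h'
              rw [PySem.Dict.contains_insert]
              simp [hne kv' h', ho kv' (List.mem_cons_of_mem _ h')])]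
      have hoins := PySem.Dict.items_insert_of_not_contains o
        [("only_base", kv.2)] (ho kv (by simp))
      refine Prod.ext ?_ (Prod.ext ?_ ?_) <;> simp only
      · apply congrArg
        apply List.filter_congr
        intro p hp
        have hpne : p.1 ≠ kv.1 := by
          intro h
          have : R.contains kv.1 = true := by
            simp only [PySem.Dict.contains]
            exact List.any_eq_true.mpr ⟨p, hp, by simp [h]⟩
          rw [this] at hR'; exact absurd hR' (by simp)
        have hbe : (p.1 == kv.1) = false := beq_eq_false_iff_ne.mpr hpne
        simp [hbe]
      · apply congrArg
        apply congrArg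
        have : (kv :: L).filter (fun kv' => R.contains kv'.1 && decide (kv'.2 ≠ R.getD kv'.1 ""))
            = L.filter (fun kv' => R.contains kv'.1 && decide (kv'.2 ≠ R.getD kv'.1 "")) := by
          rw [List.filter_cons, if_neg (by simp [hR'])]
        rw [this]
      · apply congrArg
        rw [hoins]
        have : (kv :: L).filter (fun kv' => !R.contains kv'.1)
            = kv :: L.filter (fun kv' => !R.contains kv'.1) := by
          rw [List.filter_cons, if_pos (by simp [hR'])]
        rw [this]
        simp

-- ===== VERDICT (by name: the statement is the Claim_ definition above) =====
theorem get_log_difference_spec : Claim_equal_get_log_difference := by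
  intro b t _
  unfold Spec_get_log_difference
  simp only [get_log_difference, get_log_difference_alt]
  set bd := PySem.Dict.ofList b with hbd
  set td := PySem.Dict.ofList t with htd
  have hbn : bd.keys.Nodup := PySem.Dict.nodup_keys_ofList b
  have htn : td.keys.Nodup := PySem.Dict.nodup_keys_ofList t
  -- ============ A side (as before) ============
  rw [PySem.Set.ofList_eq_self_of_nodup bd.keys hbn, PySem.Set.ofList_eq_self_of_nodup td.keys htn]
  simp only [PySem.Set.inter, PySem.Set.diff, PySem.Set.contains_eq_listContains]
  set U := bd.keys.filter (fun k => td.keys.contains k) with hU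
  set Ab := bd.keys.filter (fun k => !td.keys.contains k) with hAb
  set At := td.keys.filter (fun k => !bd.keys.contains k) with hAt
  set D1 := U.foldl (fun d k =>
      if bd.getD k "" ≠ td.getD k "" then
        d.insert k [("base_value", bd.getD k ""), ("test_value", td.getD k "")]
      else d) PySem.Dict.empty with hD1
  set D2 := Ab.foldl (fun d k => d.insert k [("only_base", bd.getD k "")]) D1 with hD2
  have hd1 : D1.items = (U.filter (fun k => decide (bd.getD k "" ≠ td.getD k ""))).map
      (fun k => (k, [("base_value", bd.getD k ""), ("test_value", td.getD k "")])) := by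
    rw [hD1, foldA_if_items _ _ U PySem.Dict.empty (hbn.filter _)
      (fun k _ => by simp [pysem])]
    simp [PySem.Dict.empty]
  have hd1keys : ∀ kv ∈ D1.items, td.keys.contains kv.1 = true := by
    intro kv hkv
    rw [hd1] at hkv
    obtain ⟨u, hu, rfl⟩ := List.mem_map.mp hkv
    have := List.mem_filter.mp (List.mem_filter.mp hu).1
    exact this.2
  have hd2 : D2.items = D1.items ++ Ab.map (fun k => (k, [("only_base", bd.getD k "")])) := by
    rw [hD2, foldA_items _ Ab D1 (hbn.filter _) ?fresh]
    case fresh =>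
      intro k hk
      have hknot : (!td.keys.contains k) = true := (List.mem_filter.mp hk).2
      simp only [PySem.Dict.contains, List.any_eq_false]
      intro kv hkv
      have := hd1keys kv hkv
      simp only [beq_iff_eq]
      intro h
      rw [h] at this
      simp only [Bool.not_eq_true'] at hknot
      rw [hknot] at this
      exact Bool.false_ne_true this
  have hd2keys : ∀ kv ∈ D2.items, bd.keys.contains kv.1 = true := by
    intro kv hkv
    rw [hd2] at hkv
    rcases List.mem_append.mp hkv with h | h
    · have h1 := hd1keys kv h
      rw [hd1] at h
      obtain ⟨u, hu, rfl⟩ := List.mem_map.mp h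
      have := (List.mem_filter.mp (List.mem_filter.mp hu).1).1
      simpa using this
    · obtain ⟨u, hu, rfl⟩ := List.mem_map.mp h
      have := (List.mem_filter.mp hu).1
      simpa using this
  have hd3 : (At.foldl (fun d k => d.insert k [("only_test", td.getD k "")]) D2).items
      = D2.items ++ At.map (fun k => (k, [("only_test", td.getD k "")])) := by
    rw [foldA_items _ At D2 (htn.filter _) ?fresh]
    case fresh =>
      intro k hk
      have hknot : (!bd.keys.contains k) = true := (List.mem_filter.mp hk).2
      simp only [PySem.Dict.contains, List.any_eq_false]
      intro kv hkv
      have := hd2keys kv hkv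
      simp only [beq_iff_eq]
      intro h
      rw [h] at this
      simp only [Bool.not_eq_true'] at hknot
      rw [hknot] at this
      exact Bool.false_ne_true this
  rw [hd3, hd2, hd1]
  have hbg : ∀ kv ∈ bd.items, bd.getD kv.1 "" = kv.2 := by
    intro kv hkv
    exact PySem.Dict.getD_of_mem_items bd (by exact hkv) hbn ""
  have htg : ∀ kv ∈ td.items, td.getD kv.1 "" = kv.2 := by
    intro kv hkv
    exact PySem.Dict.getD_of_mem_items td (by exact hkv) htn ""
  have hbkeys : bd.keys = bd.items.map (fun x => x.1) := rfl
  have htkeys : td.keys = td.items.map (fun x => x.1) := rfl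
  have hseg1 : (U.filter (fun k => decide (bd.getD k "" ≠ td.getD k ""))).map
      (fun k => (k, [("base_value", bd.getD k ""), ("test_value", td.getD k "")]))
      = (bd.items.filter (fun kv => td.contains kv.1 && decide (kv.2 ≠ td.getD kv.1 ""))).map
          (fun kv => (kv.1, [("base_value", kv.2), ("test_value", td.getD kv.1 "")])) := by
    rw [hU, List.filter_filter, hbkeys]
    refine seg_eq bd.items ?_ ?_
    · intro kv hkv
      rw [hbg kv hkv, contains_eq_keys_contains, Bool.and_comm]
    · intro kv hkv _
      rw [hbg kv hkv]
  have hseg2 : Ab.map (fun k => (k, [("only_base", bd.getD k "")]))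
      = (bd.items.filter (fun kv => !td.contains kv.1)).map
          (fun kv => (kv.1, [("only_base", kv.2)])) := by
    have : Ab = Ab.filter (fun _ => true) := by simp
    rw [this, hAb, List.filter_filter, hbkeys]
    refine seg_eq bd.items ?_ ?_
    · intro kv hkv
      simp [contains_eq_keys_contains]
    · intro kv hkv _
      rw [hbg kv hkv]
  have hseg3 : At.map (fun k => (k, [("only_test", td.getD k "")]))
      = (td.items.filter (fun kv => !bd.contains kv.1)).map
          (fun kv => (kv.1, [("only_test", kv.2)])) := by
    have : At = At.filter (fun _ => true) := by simp
    rw [this, hAt, List.filter_filter, htkeys]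
    refine seg_eq td.items ?_ ?_
    · intro kv hkv
      simp [contains_eq_keys_contains]
    · intro kv hkv _
      rw [htg kv hkv]
  rw [hseg1, hseg2, hseg3]
  -- ============ B side ============
  have hbitemsnd : (bd.items.map Prod.fst).Nodup := by
    have : bd.items.map Prod.fst = bd.keys := rfl
    rw [this]; exact hbn
  rw [consume_spec bd.items td PySem.Dict.empty PySem.Dict.empty hbitemsnd
      (fun kv _ => by simp [pysem]) (fun kv _ => by simp [pysem])]
  simp only
  set seg1 := (bd.items.filter (fun kv => td.contains kv.1 && decide (kv.2 ≠ td.getD kv.1 ""))).map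
      (fun kv => (kv.1, [("base_value", kv.2), ("test_value", td.getD kv.1 "")])) with hseg1'
  set seg2l := (bd.items.filter (fun kv => !td.contains kv.1)).map
      (fun kv => (kv.1, [("only_base", kv.2)])) with hseg2'
  set reml := td.items.filter (fun kv => !(bd.items.map Prod.fst).contains kv.1) with hreml
  -- keys of the three segments
  have hseg1keys : ∀ p ∈ seg1, p.1 ∈ bd.keys ∧ td.contains p.1 = true := by
    intro p hp
    rw [hseg1'] at hp
    obtain ⟨kv, hkv, rfl⟩ := List.mem_map.mp hp
    have h1 := (List.mem_filter.mp hkv).1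
    have h2 := (List.mem_filter.mp hkv).2
    rw [Bool.and_eq_true] at h2
    exact ⟨List.mem_map_of_mem h1, h2.1⟩
  have hseg2keys : ∀ p ∈ seg2l, p.1 ∈ bd.keys ∧ td.contains p.1 = false := by
    intro p hp
    rw [hseg2'] at hp
    obtain ⟨kv, hkv, rfl⟩ := List.mem_map.mp hp
    refine ⟨List.mem_map_of_mem (List.mem_filter.mp hkv).1, ?_⟩
    have := (List.mem_filter.mp hkv).2
    simpa using this
  have hremkeys : ∀ p ∈ reml, p.1 ∉ bd.keys := by
    intro p hp hmem
    have hp' : p ∈ td.items.filter (fun kv => !(bd.items.map Prod.fst).contains kv.1) := by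
      rw [← hreml]; exact hp
    have h2 := (List.mem_filter.mp hp').2
    have h3 : (bd.items.map Prod.fst).contains p.1 = true := by
      have hm : p.1 ∈ bd.items.map Prod.fst := hmem
      simpa using hm
    rw [h3] at h2
    simp at h2
  simp only [show (PySem.Dict.empty : PySem.Dict String (List (String × String))).items = [] from rfl,
    List.nil_append]
  -- changed.update(only_base): fold over seg2l into ⟨seg1⟩ appends
  have hndseg2 : (seg2l.map Prod.fst).Nodup := by
    have h : seg2l.map Prod.fst
        = (bd.items.filter (fun kv => !td.contains kv.1)).map (fun x => x.1) := by
      rw [hseg2', List.map_map]; rfl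
    rw [h]
    exact hbn.sublist (List.Sublist.map _ List.filter_sublist)
  have hfresh2 : ∀ p ∈ seg2l, (⟨seg1⟩ :
      PySem.Dict String (List (String × String))).contains p.1 = false := by
    intro p hp
    simp only [PySem.Dict.contains, List.any_eq_false]
    intro q hq
    have h1 := hseg1keys q hq
    have h2 := (hseg2keys p hp).2
    simp only [beq_iff_eq]
    intro h
    rw [h] at h1
    rw [h1.2] at h2
    exact Bool.noConfusion h2
  have hupd : ((seg2l.foldl (fun d kv => d.insert kv.1 kv.2)
        (⟨seg1⟩ : PySem.Dict String (List (String × String))))) = ⟨seg1 ++ seg2l⟩ := by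
    apply PySem.Dict.ext
    rw [PySem.Dict.items_foldl_insert_fresh seg2l Prod.fst Prod.snd _ hfresh2 hndseg2]
    simp
  rw [hupd]
  -- leftover pass: fold over reml into ⟨seg1 ++ seg2l⟩ appends
  have hndrem : (reml.map Prod.fst).Nodup := by
    have h : reml.map Prod.fst
        = (td.items.filter (fun kv => !(bd.items.map Prod.fst).contains kv.1)).map (fun x => x.1) := by
      rw [hreml]
    rw [h]
    exact htn.sublist (List.Sublist.map _ List.filter_sublist)
  have hfresh3 : ∀ p ∈ reml, (⟨seg1 ++ seg2l⟩ :
      PySem.Dict String (List (String × String))).contains p.1 = false := by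
    intro p hp
    simp only [PySem.Dict.contains, List.any_eq_false]
    intro q hq
    simp only [beq_iff_eq]
    intro h
    have hnb := hremkeys p hp
    rcases List.mem_append.mp hq with h1 | h1
    · exact hnb (h ▸ (hseg1keys q h1).1)
    · exact hnb (h ▸ (hseg2keys q h1).1)
  have hfin : ((reml.foldl
        (fun d kv => d.insert kv.1 [("only_test", kv.2)])
        (⟨seg1 ++ seg2l⟩ : PySem.Dict String (List (String × String)))).items)
      = (seg1 ++ seg2l) ++ reml.map (fun kv => (kv.1, [("only_test", kv.2)])) := by
    rw [PySem.Dict.items_foldl_insert_fresh reml Prod.fst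
        (fun kv => [("only_test", kv.2)]) _ hfresh3 hndrem]
  rw [hfin]
  -- the leftover of the copy is exactly A's additional_key segment
  have hseg3 : (td.items.filter (fun kv => !bd.contains kv.1)).map
      (fun kv => (kv.1, [("only_test", kv.2)]))
      = reml.map (fun kv => (kv.1, [("only_test", kv.2)])) := by
    rw [hreml]
    apply congrArg
    apply List.filter_congr
    intro kv _
    have : bd.contains kv.1 = (bd.items.map Prod.fst).contains kv.1 := by
      rw [contains_eq_keys_contains]; rfl
    rw [this]
  rw [hseg3]
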